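-- pv_equiv track=rewrite | github.com/dylrei/flowly | src/flowly/utils/overlap.py | overlay_combine_lists
-- ===== SOURCE A (Python) =====
-- def overlay_combine_lists(left, right):
--     # Easier to show than describe:
--     # > overlay_combine_lists([1, 2, 3, 4, 5], [4, 5, 6, 7, 8])
--     # [1, 2, 3, 4, 5, 6, 7, 8]
--     # > overlay_combine_lists([1, 2, 3, 3, 3], [3, 4, 5, 6, 7, 8])
--     # [1, 2, 3, 3, 3, 4, 5, 6, 7, 8]
--     left_starts_with_empty = left[0] == ''
--     left = [item for item in left if item != '']
--     if left_starts_with_empty: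
--         left = [''] + left
--     right = [item for item in right if item != '']
--     left_len, right_len = map(len, [left, right])
--     if left_len >= right_len:
--         starting_offset = right_len
--     else:
--         starting_offset = right_len - left_len
--     for offset in range(starting_offset, 0, -1):
--         if left[-offset:] == right[:offset]:
--             return left[:-offset] + right[:offset] + right[offset:]
-- ===== SOURCE B (Python) =====
-- def overlay_combine_lists(left, right):
--     # Rolling-hash (Rabin-Karp) reimplementation: one ascending pass builds the
--     # suffix-of-left / prefix-of-right hashes and collects candidate offsets whose
--     # hashes agree; the largest verified candidate wins.  Offsets above
--     # min(starting_offset, len(left)) can never match (length mismatch), so they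
--     # are not scanned at all.
--     n, m = len(left), len(right)
--     cap = m if n >= m else m - n
--     top = cap if cap < n else n
--     base, mod = 1000003, (1 << 61) - 1
--     s = h = 0
--     p = 1
--     cands = []
--     for o in range(1, top + 1):
--         s = (left[n - o] * p + s) % mod
--         h = (h * base + right[o - 1]) % mod
--         p = p * base % mod
--         if s == h:
--             cands.append(o)
--     for o in reversed(cands):
--         if left[n - o:] == right[:o]:
--             return left[:n - o] + right
--     return None
-- ===== Notes on version B (the rewrite author's own statement) =====
-- stated objective: faster
-- what changed: Replaced A's descending scan that slice-compares left[-offset:] with right[:offset] at every offset by a Rabin-Karp rolling hash: one ascending O(n+m) pass builds suffix/prefix hashes and collects the offsets whose hashes agree, and only those candidates are verified, largest first; offsets above min(starting_offset, len(left)) are skipped since a length mismatch makes them impossible.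
import Mathlib
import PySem

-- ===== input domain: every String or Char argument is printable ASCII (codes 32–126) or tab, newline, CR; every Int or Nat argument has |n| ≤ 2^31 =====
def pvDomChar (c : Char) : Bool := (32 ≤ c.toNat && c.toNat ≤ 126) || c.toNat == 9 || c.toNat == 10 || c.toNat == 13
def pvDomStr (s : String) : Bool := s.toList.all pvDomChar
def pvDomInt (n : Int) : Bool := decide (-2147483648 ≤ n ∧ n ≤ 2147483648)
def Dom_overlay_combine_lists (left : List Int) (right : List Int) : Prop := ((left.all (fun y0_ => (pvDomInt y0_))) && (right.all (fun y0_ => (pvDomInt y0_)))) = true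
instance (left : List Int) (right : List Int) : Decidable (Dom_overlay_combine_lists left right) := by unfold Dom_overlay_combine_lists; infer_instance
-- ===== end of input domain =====

-- B replaces A's descending slice-compare scan by a Rabin-Karp rolling hash (one ascending
-- pass collecting hash-matching candidate offsets, then verification largest-first); the
-- timing run measured B faster on the large inputs.

-- ===== PORT A =====
-- for offset in range(starting_offset, 0, -1): first matching offset, counting down
def pvA_loop (left right : List Int) : Nat → Option (List Int)
  | 0 => none
  | o+1 =>
    if PySem.List.slice left (some (-((o+1 : Nat) : Int))) none
        = PySem.List.slice right none (some ((o+1 : Nat) : Int)) then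
      some (PySem.List.slice left none (some (-((o+1 : Nat) : Int)))
            ++ PySem.List.slice right none (some ((o+1 : Nat) : Int))
            ++ PySem.List.slice right (some ((o+1 : Nat) : Int)) none)
    else pvA_loop left right o

def overlay_combine_lists (left : List Int) (right : List Int) : Option (List Int) :=
  if left = [] then none  -- left[0] raises IndexError in Python; excluded by Pre_
  else
    -- left[0] == '' : an int never equals '' in Python, so left_starts_with_empty is False,
    -- and the filters [item for item in … if item != ''] keep every int.
    let left1 := left.filter (fun _ => true)
    let right1 := right.filter (fun _ => true)
    let leftLen := left1.length
    let rightLen := right1.length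
    let startingOffset := if rightLen ≤ leftLen then rightLen else rightLen - leftLen
    pvA_loop left1 right1 startingOffset

-- ===== PORT B =====
def pvBase : Int := 1000003
def pvMod : Int := 2305843009213693951

-- for o in range(1, top+1): state (s, h, p, cands) of Source B's ascending hashing pass
def pvB_scan (left right : List Int) (n : Nat) : Nat → Int × Int × Int × List Nat
  | 0 => (0, 0, 1, [])
  | o+1 =>
    let st := pvB_scan left right n o
    let s' := PySem.Int.mod (left.getD (n - (o+1)) 0 * st.2.2.1 + st.1) pvMod
    let h' := PySem.Int.mod (st.2.1 * pvBase + right.getD o 0) pvMod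
    let p' := PySem.Int.mod (st.2.2.1 * pvBase) pvMod
    (s', h', p', if s' = h' then st.2.2.2 ++ [o+1] else st.2.2.2)

-- for o in reversed(cands): the slices left[n-o:], right[:o], left[:n-o] have
-- nonnegative bounds (1 ≤ o ≤ n), where a Python slice is exactly drop/take.
def pvB_pick (left right : List Int) (n : Nat) : List Nat → Option (List Int)
  | [] => none
  | o :: rest =>
    if left.drop (n - o) = right.take o then some (left.take (n - o) ++ right)
    else pvB_pick left right n rest

def overlay_combine_lists_alt (left : List Int) (right : List Int) : Option (List Int) :=
  let n := left.length
  let m := right.length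
  let cap := if m ≤ n then m else m - n
  let top := if cap < n then cap else n
  pvB_pick left right n ((pvB_scan left right n top).2.2.2).reverse

-- ===== PRECONDITION & SPEC =====
-- A evaluates left[0], an IndexError on an empty left; that is all Pre_ excludes.
def Pre_overlay_combine_lists (left : List Int) (right : List Int) : Prop := left ≠ []
instance (left : List Int) (right : List Int) : Decidable (Pre_overlay_combine_lists left right) := by unfold Pre_overlay_combine_lists; infer_instance
def pvWitness_overlay_combine_lists : List Int × List Int := ([1, 2, 3], [3, 4])

def Spec_overlay_combine_lists (left : List Int) (right : List Int) (out : Option (List Int)) : Prop := out = overlay_combine_lists_alt left right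
instance (left : List Int) (right : List Int) (out : Option (List Int)) : Decidable (Spec_overlay_combine_lists left right out) := by unfold Spec_overlay_combine_lists; infer_instance

-- ===== CLAIM (what is proved, stated in full; the proofs are below) =====
def Claim_equal_overlay_combine_lists : Prop := ∀ (left : List Int) (right : List Int), Dom_overlay_combine_lists left right → Pre_overlay_combine_lists left right → Spec_overlay_combine_lists left right (overlay_combine_lists left right)

-- ===== LEMMAS AND PROOFS =====

-- Proof-side closed recurrences for the components of pvB_scan's state.
def pvHstep (h x : Int) : Int := (h * pvBase + x) % pvMod
def pvBigHash (xs : List Int) : Int := xs.foldl pvHstep 0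
def pvPw : Nat → Int
  | 0 => 1
  | k+1 => (pvPw k * pvBase) % pvMod
def pvSv (left : List Int) (n : Nat) : Nat → Int
  | 0 => 0
  | o+1 => (left.getD (n - (o+1)) 0 * pvPw o + pvSv left n o) % pvMod
def pvHv (right : List Int) : Nat → Int
  | 0 => 0
  | o+1 => (pvHv right o * pvBase + right.getD o 0) % pvMod
def pvCands (left right : List Int) (n : Nat) : Nat → List Nat
  | 0 => []
  | o+1 => pvCands left right n o ++ (if pvSv left n (o+1) = pvHv right (o+1) then [o+1] else [])

theorem pv_mod_emod (a : Int) : PySem.Int.mod a pvMod = a % pvMod :=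
  PySem.Int.mod_eq_emod_of_pos (by norm_num [pvMod])

theorem pv_scan_eq (left right : List Int) (n : Nat) :
    ∀ o, pvB_scan left right n o
      = (pvSv left n o, pvHv right o, pvPw o, pvCands left right n o) := by
  intro o
  induction o with
  | zero => simp [pvB_scan, pvSv, pvHv, pvPw, pvCands]
  | succ o ih =>
    simp only [pvB_scan, ih, pv_mod_emod, pvCands]
    simp only [pvSv, pvHv, pvPw]
    split <;> simp

theorem pv_hstep_modeq (h x : Int) : pvHstep h x ≡ h * pvBase + x [ZMOD pvMod] :=
  Int.emod_emod_of_dvd _ dvd_rfl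

theorem pv_hash_shift (xs : List Int) :
    ∀ h : Int, List.foldl pvHstep h xs
      ≡ h * pvBase ^ xs.length + List.foldl pvHstep 0 xs [ZMOD pvMod] := by
  induction xs with
  | nil => intro h; simp
  | cons x xs ih =>
    intro h
    calc List.foldl pvHstep (pvHstep h x) xs
        ≡ pvHstep h x * pvBase ^ xs.length + List.foldl pvHstep 0 xs [ZMOD pvMod] := ih _
      _ ≡ (h * pvBase + x) * pvBase ^ xs.length + List.foldl pvHstep 0 xs [ZMOD pvMod] :=
          Int.ModEq.add_right _ (Int.ModEq.mul_right _ (pv_hstep_modeq h x))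
      _ = h * pvBase ^ (xs.length + 1) + (x * pvBase ^ xs.length + List.foldl pvHstep 0 xs) := by
          ring
      _ ≡ h * pvBase ^ (xs.length + 1) + (pvHstep 0 x * pvBase ^ xs.length + List.foldl pvHstep 0 xs) [ZMOD pvMod] := by
          refine Int.ModEq.add_left _ (Int.ModEq.add_right _ (Int.ModEq.mul_right _ ?_))
          simpa using (pv_hstep_modeq 0 x).symm
      _ ≡ h * pvBase ^ (xs.length + 1) + List.foldl pvHstep (pvHstep 0 x) xs [ZMOD pvMod] :=
          Int.ModEq.add_left _ (ih (pvHstep 0 x)).symm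

theorem pv_pw_modeq : ∀ k, pvPw k ≡ pvBase ^ k [ZMOD pvMod] := by
  intro k
  induction k with
  | zero => simp [pvPw]
  | succ k ih =>
    calc pvPw (k+1) ≡ pvPw k * pvBase [ZMOD pvMod] := Int.emod_emod_of_dvd _ dvd_rfl
      _ ≡ pvBase ^ k * pvBase [ZMOD pvMod] := Int.ModEq.mul_right _ ih
      _ = pvBase ^ (k+1) := by ring

theorem pv_hv_eq (right : List Int) :
    ∀ o, o ≤ right.length → pvHv right o = pvBigHash (right.take o) := by
  intro o
  induction o with
  | zero => intro _; simp [pvHv, pvBigHash]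
  | succ o ih =>
    intro h
    have ho : o < right.length := by omega
    have ht : right.take (o+1) = right.take o ++ [right[o]] := by
      rw [List.take_succ, List.getElem?_eq_getElem ho]; rfl
    have hfold : pvBigHash (right.take o ++ [right[o]])
        = pvHstep (pvBigHash (right.take o)) right[o] := by
      simp only [pvBigHash, List.foldl_append, List.foldl_cons, List.foldl_nil]
    rw [pvHv, ih (by omega), ht, hfold, pvHstep]
    simp [List.getD, List.getElem?_eq_getElem ho]

theorem pv_sv_modeq (left : List Int) :
    ∀ o, o ≤ left.length →
      pvSv left left.length o ≡ pvBigHash (left.drop (left.length - o)) [ZMOD pvMod] := by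
  intro o
  induction o with
  | zero => intro _; simp [pvSv, pvBigHash]
  | succ o ih =>
    intro h
    have hi : left.length - (o+1) < left.length := by omega
    have hidx : left.length - (o+1) + 1 = left.length - o := by omega
    have hdrop : left.drop (left.length - (o+1))
        = left[left.length - (o+1)] :: left.drop (left.length - o) := by
      rw [List.drop_eq_getElem_cons hi, hidx]
    have hlen : (left.drop (left.length - o)).length = o := by
      rw [List.length_drop]; omega
    calc pvSv left left.length (o+1)
        ≡ left.getD (left.length - (o+1)) 0 * pvPw o + pvSv left left.length o [ZMOD pvMod] :=
          Int.emod_emod_of_dvd _ dvd_rfl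
      _ ≡ left[left.length - (o+1)] * pvBase ^ o + pvBigHash (left.drop (left.length - o)) [ZMOD pvMod] := by
          rw [List.getD, List.getElem?_eq_getElem hi]
          exact Int.ModEq.add (Int.ModEq.mul_left _ (pv_pw_modeq o)) (ih (by omega))
      _ ≡ pvHstep 0 left[left.length - (o+1)] * pvBase ^ o
            + pvBigHash (left.drop (left.length - o)) [ZMOD pvMod] := by
          refine Int.ModEq.add_right _ (Int.ModEq.mul_right _ ?_)
          simpa using (pv_hstep_modeq 0 _).symm
      _ ≡ pvBigHash (left.drop (left.length - (o+1))) [ZMOD pvMod] := by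
          rw [hdrop]
          have := pv_hash_shift (left.drop (left.length - o)) (pvHstep 0 left[left.length - (o+1)])
          rw [hlen] at this
          simpa [pvBigHash] using this.symm

theorem pv_hashes_eq_of_eq (left right : List Int) (o : Nat)
    (h1 : 1 ≤ o) (hn : o ≤ left.length) (hm : o ≤ right.length)
    (heq : left.drop (left.length - o) = right.take o) :
    pvSv left left.length o = pvHv right o := by
  obtain ⟨o', rfl⟩ : ∃ o', o = o' + 1 := ⟨o - 1, by omega⟩
  have hmod : pvSv left left.length (o'+1) ≡ pvHv right (o'+1) [ZMOD pvMod] := by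
    calc pvSv left left.length (o'+1)
        ≡ pvBigHash (left.drop (left.length - (o'+1))) [ZMOD pvMod] := pv_sv_modeq left _ hn
      _ = pvBigHash (right.take (o'+1)) := by rw [heq]
      _ = pvHv right (o'+1) := (pv_hv_eq right _ hm).symm
  have hs : pvSv left left.length (o'+1) % pvMod = pvSv left left.length (o'+1) := by
    rw [pvSv]; exact Int.emod_emod_of_dvd _ dvd_rfl
  have hh : pvHv right (o'+1) % pvMod = pvHv right (o'+1) := by
    rw [pvHv]; exact Int.emod_emod_of_dvd _ dvd_rfl
  calc pvSv left left.length (o'+1) = pvSv left left.length (o'+1) % pvMod := hs.symm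
    _ = pvHv right (o'+1) % pvMod := hmod
    _ = pvHv right (o'+1) := hh

theorem pv_pick_eq_loop (left right : List Int) :
    ∀ o, o ≤ left.length → o ≤ right.length →
      pvB_pick left right left.length (pvCands left right left.length o).reverse
        = pvA_loop left right o := by
  intro o
  induction o with
  | zero => intro _ _; simp [pvCands, pvB_pick, pvA_loop]
  | succ o ih =>
    intro hn hm
    rw [pvA_loop,
        PySem.List.slice_from_neg_natCast left (o+1) (by omega),
        PySem.List.slice_to_natCast,
        PySem.List.slice_to_neg_natCast left (o+1) (by omega),
        PySem.List.slice_from_natCast]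
    rw [pvCands, List.reverse_append]
    by_cases hh : pvSv left left.length (o+1) = pvHv right (o+1)
    · rw [if_pos hh]
      rw [show ([o+1] : List Nat).reverse = [o+1] from rfl]
      rw [List.singleton_append, pvB_pick]
      by_cases hc : left.drop (left.length - (o+1)) = right.take (o+1)
      · rw [if_pos hc, if_pos hc]
        rw [List.append_assoc, List.take_append_drop]
      · rw [if_neg hc, if_neg hc]
        exact ih (by omega) (by omega)
    · rw [if_neg hh]
      have hc : ¬ left.drop (left.length - (o+1)) = right.take (o+1) := by
        intro hc
        exact hh (pv_hashes_eq_of_eq left right (o+1) (by omega) hn hm hc)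
      rw [if_neg hc]
      simpa using ih (by omega) (by omega)

theorem pv_aloop_high (left right : List Int) (top : Nat) (hn : left.length ≤ top) :
    ∀ j, top ≤ j → j ≤ right.length → pvA_loop left right j = pvA_loop left right top := by
  intro j
  induction j with
  | zero =>
    intro h _
    rw [Nat.le_zero.mp h]
  | succ j ih =>
    intro hj hm
    rcases Nat.eq_or_lt_of_le hj with h | h
    · rw [h]
    · rw [pvA_loop,
          PySem.List.slice_from_neg_natCast left (j+1) (by omega),
          PySem.List.slice_to_natCast]
      have hc : ¬ left.drop (left.length - (j+1)) = right.take (j+1) := by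
        intro hc
        have := congrArg List.length hc
        simp at this
        omega
      rw [if_neg hc]
      exact ih (by omega) (by omega)

-- ===== VERDICT (by name: the statement is the Claim_ definition above) =====
theorem overlay_combine_lists_spec : Claim_equal_overlay_combine_lists := by
  intro left right _ hpre
  unfold Spec_overlay_combine_lists overlay_combine_lists overlay_combine_lists_alt
  rw [if_neg hpre]
  simp only [List.filter_true]
  rw [pv_scan_eq]
  set c := (if right.length ≤ left.length then right.length else right.length - left.length) with hc
  have hcm : c ≤ right.length := by rw [hc]; split <;> omega
  by_cases hcap : c < left.length
  · rw [if_pos hcap]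
    exact (pv_pick_eq_loop left right c (by omega) hcm).symm
  · rw [if_neg hcap]
    have hnm : left.length ≤ right.length := by rw [hc] at hcap; split at hcap <;> omega
    rw [pv_aloop_high left right left.length le_rfl c (by omega) hcm]
    exact (pv_pick_eq_loop left right left.length le_rfl hnm).symm
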